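-- pv_equiv track=rewrite | github.com/imji0319/new_python | PythonInterview/CodingStudy/weekly/1주차.py | solution
-- ===== SOURCE A (Python) =====
-- def solution(price, money, count):
--     answer = -1
--     to = 0
--     for i in range(count):
--         to += price * (i + 1)
--
--     if to < money:
--         answer = 0
--     else:
--         answer = to - money
--
--     return answer
-- ===== SOURCE B (Python) =====
-- def solution(price, money, count):
--     n = max(count, 0)
--     to = price * (n * (n + 1) // 2)
--     return 0 if to < money else to - money
-- ===== Notes on version B (the rewrite author's own statement) =====
-- stated objective: faster
-- what changed: Replaces the O(count) summation loop with the arithmetic-series closed form price * count*(count+1)//2 (clamping count at 0), keeping the same final comparison.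
import Mathlib
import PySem

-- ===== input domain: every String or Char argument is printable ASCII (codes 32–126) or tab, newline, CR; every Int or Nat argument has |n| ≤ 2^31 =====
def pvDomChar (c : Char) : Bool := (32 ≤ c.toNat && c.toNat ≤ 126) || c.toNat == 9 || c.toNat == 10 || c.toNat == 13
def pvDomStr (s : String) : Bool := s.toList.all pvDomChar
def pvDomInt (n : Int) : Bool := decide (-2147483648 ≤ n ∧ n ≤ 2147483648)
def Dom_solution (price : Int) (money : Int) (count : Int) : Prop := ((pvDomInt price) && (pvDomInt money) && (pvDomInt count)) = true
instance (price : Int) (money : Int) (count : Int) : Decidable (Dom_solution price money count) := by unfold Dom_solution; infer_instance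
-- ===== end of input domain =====

-- B replaces A's O(count) summation loop with the O(1) arithmetic-series closed form.

-- ===== PORT A =====
def solution (price : Int) (money : Int) (count : Int) : Int :=
  let answer : Int := -1
  let tot := (PySem.List.pyRange 0 count 1).foldl (fun acc i => acc + price * (i + 1)) 0
  let answer := if tot < money then 0 else tot - money
  answer

-- ===== PORT B =====
def solution_alt (price : Int) (money : Int) (count : Int) : Int :=
  let n := max count 0
  let tot := price * (PySem.Int.floordiv (n * (n + 1)) 2)
  if tot < money then 0 else tot - money

-- ===== PRECONDITION & SPEC =====
def Spec_solution (price : Int) (money : Int) (count : Int) (out : Int) : Prop := out = solution_alt price money count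
instance (price : Int) (money : Int) (count : Int) (out : Int) : Decidable (Spec_solution price money count out) := by unfold Spec_solution; infer_instance

-- ===== CLAIM (what is proved, stated in full; the proofs are below) =====
def Claim_equal_solution : Prop := ∀ (price : Int) (money : Int) (count : Int), Dom_solution price money count → Spec_solution price money count (solution price money count)

-- ===== LEMMAS AND PROOFS =====

-- the loop's sum over range(m) equals the closed form, for natural m
theorem sum_loop_eq (price : Int) (m : ℕ) :
    (PySem.List.pyRange 0 (m : Int) 1).foldl (fun acc i => acc + price * (i + 1)) 0
      = price * (PySem.Int.floordiv ((m : Int) * ((m : Int) + 1)) 2) := by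
  induction m with
  | zero => simp [PySem.List.pyRange_one_eq_nil, PySem.Int.floordiv]
  | succ k ih =>
    have h : ((k + 1 : ℕ) : Int) = (k : Int) + 1 := by push_cast; ring
    rw [h, PySem.List.pyRange_one_succ_right (by positivity), List.foldl_append, ih]
    simp only [List.foldl]
    have e2 : ∃ t : Int, (k : Int) * ((k : Int) + 1) = 2 * t ∧ 0 ≤ t := by
      rcases Int.even_mul_succ_self (k : Int) with ⟨t, ht⟩
      exact ⟨t, by omega, by nlinarith [Int.natCast_nonneg k]⟩
    have e3 : ∃ t : Int, ((k : Int) + 1) * (((k : Int) + 1) + 1) = 2 * t ∧ 0 ≤ t := by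
      rcases Int.even_mul_succ_self ((k : Int) + 1) with ⟨t, ht⟩
      exact ⟨t, by omega, by nlinarith [Int.natCast_nonneg k]⟩
    rcases e2 with ⟨t, ht, htn⟩
    rcases e3 with ⟨u, hu, hun⟩
    rw [ht, hu]
    have fd : ∀ v : Int, 0 ≤ v → PySem.Int.floordiv (2 * v) 2 = v := by
      intro v hv
      simp [PySem.Int.floordiv, Int.mul_fdiv_cancel_left _ (by norm_num : (2:Int) ≠ 0)]
    rw [fd t htn, fd u hun]
    have hut : u = t + (k : Int) + 1 := by nlinarith [ht, hu]
    rw [hut]; ring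

theorem sum_loop_eq' (price count : Int) :
    (PySem.List.pyRange 0 count 1).foldl (fun acc i => acc + price * (i + 1)) 0
      = price * (PySem.Int.floordiv ((max count 0) * ((max count 0) + 1)) 2) := by
  by_cases h : count ≤ 0
  · rw [PySem.List.pyRange_one_eq_nil (by omega)]
    have : max count 0 = 0 := by omega
    simp [this, PySem.Int.floordiv]
  · push_neg at h
    have hm : max count 0 = count := by omega
    obtain ⟨m, rfl⟩ : ∃ m : ℕ, count = (m : Int) := ⟨count.toNat, by omega⟩
    rw [hm]; exact sum_loop_eq price m

-- ===== VERDICT (by name: the statement is the Claim_ definition above) =====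
theorem solution_spec : Claim_equal_solution := by
  intro price money count _
  unfold Spec_solution solution solution_alt
  simp only [sum_loop_eq' price count]
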